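-- pv_equiv track=rewrite | github.com/DingoLabs/personal-python-projects | s24python/hostnames2.py | is_hostname3
-- ===== SOURCE A (Python) =====
-- def is_hostname3(text):
--     if len(text) != 11:
--         return False
--     for i in range(0,2):
--         if not text[i].isalpha():
--             return False
--     if text[3] != '-':
--         return False
--     for i in range(4,8):
--         if not text[i].isalpha():
--             return False
--     for i in range(9,10):
--         if not text[i].isdigit():
--             return False
--     return True
-- ===== SOURCE B (Python) =====
-- PATTERN = "aa.-aaaa.d."  # 'a' = any alphabetic, 'd' = any digit, '.' = any char, else literal
--
-- def _match(pat, s):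
--     if not pat:
--         return not s
--     if not s:
--         return False
--     p = pat[0]
--     if p == 'a':
--         ok = s[0].isalpha()
--     elif p == 'd':
--         ok = s[0].isdigit()
--     elif p == '.':
--         ok = True
--     else:
--         ok = s[0] == p
--     return ok and _match(pat[1:], s[1:])
--
-- def is_hostname3(text):
--     return _match(PATTERN, text)
-- ===== Notes on version B (the rewrite author's own statement) =====
-- stated objective: alternative
-- what changed: Replaces A's length guard plus four index-range loops by a tiny recursive pattern matcher that consumes a template string ('a'=alpha, 'd'=digit, '.'=any, literal otherwise) and the input simultaneously; the length-11 check becomes implicit in both strings ending together.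
import Mathlib
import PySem

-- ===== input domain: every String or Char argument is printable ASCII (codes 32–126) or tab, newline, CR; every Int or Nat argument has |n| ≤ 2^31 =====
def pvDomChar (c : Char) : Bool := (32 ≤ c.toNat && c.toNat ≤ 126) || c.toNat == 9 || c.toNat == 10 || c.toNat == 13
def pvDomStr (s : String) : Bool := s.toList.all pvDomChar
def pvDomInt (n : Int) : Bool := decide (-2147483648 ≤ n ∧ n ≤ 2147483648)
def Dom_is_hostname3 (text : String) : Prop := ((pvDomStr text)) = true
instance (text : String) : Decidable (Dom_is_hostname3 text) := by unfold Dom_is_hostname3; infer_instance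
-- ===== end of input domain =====

-- B replaces A's length guard plus four index-range loops by a recursive pattern matcher
-- consuming a template string and the input together; same cost, different decomposition.

-- ===== PORT A =====
-- helper: text[i].isalpha() / .isdigit() on the char list (index always in range when reached)
def pvCharAt (cs : List Char) (i : Int) (p : Char → Bool) : Bool :=
  match PySem.List.pyGet? cs i with
  | some c => p c
  | none => false

def is_hostname3 (text : String) : Bool :=
  let cs := text.toList
  if PySem.Str.len text ≠ 11 then false
  else if ¬ ((PySem.List.pyRange 0 2 1).all fun i => pvCharAt cs i PySem.Chars.isalpha) then false
  else if PySem.List.pyGet? cs 3 ≠ some '-' then false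
  else if ¬ ((PySem.List.pyRange 4 8 1).all fun i => pvCharAt cs i PySem.Chars.isalpha) then false
  else if ¬ ((PySem.List.pyRange 9 10 1).all fun i => pvCharAt cs i PySem.Chars.isdigit) then false
  else true

-- ===== PORT B =====
def pvPattern : List Char := "aa.-aaaa.d.".toList

def pvMatch : List Char → List Char → Bool
  | [], s => s.isEmpty
  | _ :: _, [] => false
  | p :: ps, ch :: s =>
    (if p = 'a' then PySem.Chars.isalpha ch
     else if p = 'd' then PySem.Chars.isdigit ch
     else if p = '.' then true
     else ch == p) && pvMatch ps s

def is_hostname3_alt (text : String) : Bool := pvMatch pvPattern text.toList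

-- ===== PRECONDITION & SPEC =====
def Spec_is_hostname3 (text : String) (out : Bool) : Prop := out = is_hostname3_alt text
instance (text : String) (out : Bool) : Decidable (Spec_is_hostname3 text out) := by unfold Spec_is_hostname3; infer_instance

-- ===== CLAIM (what is proved, stated in full; the proofs are below) =====
def Claim_equal_is_hostname3 : Prop := ∀ (text : String), Dom_is_hostname3 text → Spec_is_hostname3 text (is_hostname3 text)

-- ===== LEMMAS AND PROOFS =====

theorem pvMatch_length {p s : List Char} (h : pvMatch p s = true) : p.length = s.length := by
  induction p generalizing s with
  | nil =>
    cases s with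
    | nil => rfl
    | cons c cs => simp [pvMatch, List.isEmpty] at h
  | cons a ps ih =>
    cases s with
    | nil => simp [pvMatch] at h
    | cons c cs =>
      simp only [pvMatch, Bool.and_eq_true] at h
      simpa using ih h.2

set_option maxHeartbeats 1000000 in
theorem key (l : List Char) (h : l.length = 11) :
    (if (l.length : Int) ≠ 11 then false
     else if ¬ ((PySem.List.pyRange 0 2 1).all fun i => pvCharAt l i PySem.Chars.isalpha) then false
     else if PySem.List.pyGet? l 3 ≠ some '-' then false
     else if ¬ ((PySem.List.pyRange 4 8 1).all fun i => pvCharAt l i PySem.Chars.isalpha) then false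
     else if ¬ ((PySem.List.pyRange 9 10 1).all fun i => pvCharAt l i PySem.Chars.isdigit) then false
     else true)
    = pvMatch pvPattern l := by
  match l, h with
  | [c0,c1,c2,c3,c4,c5,c6,c7,c8,c9,c10], _ =>
    have r1 : PySem.List.pyRange 0 2 1 = [0, 1] := by decide
    have r2 : PySem.List.pyRange 4 8 1 = [4, 5, 6, 7] := by decide
    have r3 : PySem.List.pyRange 9 10 1 = [9] := by decide
    have e0 : pvCharAt [c0,c1,c2,c3,c4,c5,c6,c7,c8,c9,c10] 0 PySem.Chars.isalpha = PySem.Chars.isalpha c0 := rfl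
    have e1 : pvCharAt [c0,c1,c2,c3,c4,c5,c6,c7,c8,c9,c10] 1 PySem.Chars.isalpha = PySem.Chars.isalpha c1 := rfl
    have e4 : pvCharAt [c0,c1,c2,c3,c4,c5,c6,c7,c8,c9,c10] 4 PySem.Chars.isalpha = PySem.Chars.isalpha c4 := rfl
    have e5 : pvCharAt [c0,c1,c2,c3,c4,c5,c6,c7,c8,c9,c10] 5 PySem.Chars.isalpha = PySem.Chars.isalpha c5 := rfl
    have e6 : pvCharAt [c0,c1,c2,c3,c4,c5,c6,c7,c8,c9,c10] 6 PySem.Chars.isalpha = PySem.Chars.isalpha c6 := rfl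
    have e7 : pvCharAt [c0,c1,c2,c3,c4,c5,c6,c7,c8,c9,c10] 7 PySem.Chars.isalpha = PySem.Chars.isalpha c7 := rfl
    have e9 : pvCharAt [c0,c1,c2,c3,c4,c5,c6,c7,c8,c9,c10] 9 PySem.Chars.isdigit = PySem.Chars.isdigit c9 := rfl
    have g3 : PySem.List.pyGet? [c0,c1,c2,c3,c4,c5,c6,c7,c8,c9,c10] 3 = some c3 := rfl
    have pat : pvPattern = ['a','a','.','-','a','a','a','a','.','d','.'] := by decide
    rw [r1, r2, r3, g3, pat]
    simp only [List.all_cons, List.all_nil, e0, e1, e4, e5, e6, e7, e9, Bool.and_true, pvMatch]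
    by_cases h3 : c3 = '-' <;>
      cases hb0 : PySem.Chars.isalpha c0 <;> cases hb1 : PySem.Chars.isalpha c1 <;>
      cases hb4 : PySem.Chars.isalpha c4 <;> cases hb5 : PySem.Chars.isalpha c5 <;>
      cases hb6 : PySem.Chars.isalpha c6 <;> cases hb7 : PySem.Chars.isalpha c7 <;>
      cases hb9 : PySem.Chars.isdigit c9 <;>
      simp [h3, List.isEmpty]

-- ===== VERDICT (by name: the statement is the Claim_ definition above) =====
theorem is_hostname3_spec : Claim_equal_is_hostname3 := by
  intro text _
  unfold Spec_is_hostname3 is_hostname3 is_hostname3_alt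
  by_cases h : text.toList.length = 11
  · simpa [PySem.Str.len] using key text.toList h
  · have h0 : text.length ≠ 11 := by simpa using h
    have h' : (text.length : Int) ≠ 11 := by exact_mod_cast h0
    have hm : pvMatch pvPattern text.toList = false := by
      cases hmm : pvMatch pvPattern text.toList with
      | false => rfl
      | true =>
        have hp : pvPattern.length = 11 := by decide
        have hl := pvMatch_length hmm
        exact absurd (show text.toList.length = 11 by omega) h
    simp [h', hm]
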